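-- pv_equiv track=rewrite | github.com/llevaachingada/rbassist | scripts/profile_embed_gpu.py | extract_summary_line
-- ===== SOURCE A (Python) =====
-- def extract_summary_line(stdout: str, stderr: str) -> str:
--     merged = f"{stdout}\n{stderr}"
--     for line in merged.splitlines():
--         if "Embedding summary:" in line:
--             return line.strip()
--     for line in merged.splitlines():
--         t = line.strip()
--         if t:
--             return t[:240]
--     return ""
-- ===== SOURCE B (Python) =====
-- def extract_summary_line(stdout: str, stderr: str) -> str:
--     fallback = None
--     for line in f"{stdout}\n{stderr}".splitlines():
--         if "Embedding summary:" in line: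
--             return line.strip()
--         if fallback is None:
--             t = line.strip()
--             if t:
--                 fallback = t[:240]
--     return fallback if fallback is not None else ""
-- ===== Notes on version B (the rewrite author's own statement) =====
-- stated objective: simpler
-- what changed: Replaces A's two sequential scans of the split lines (marker scan, then first-nonempty scan) by one single pass that returns immediately on the marker line and remembers the first nonempty line (truncated to 240) as a fallback.
import Mathlib
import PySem

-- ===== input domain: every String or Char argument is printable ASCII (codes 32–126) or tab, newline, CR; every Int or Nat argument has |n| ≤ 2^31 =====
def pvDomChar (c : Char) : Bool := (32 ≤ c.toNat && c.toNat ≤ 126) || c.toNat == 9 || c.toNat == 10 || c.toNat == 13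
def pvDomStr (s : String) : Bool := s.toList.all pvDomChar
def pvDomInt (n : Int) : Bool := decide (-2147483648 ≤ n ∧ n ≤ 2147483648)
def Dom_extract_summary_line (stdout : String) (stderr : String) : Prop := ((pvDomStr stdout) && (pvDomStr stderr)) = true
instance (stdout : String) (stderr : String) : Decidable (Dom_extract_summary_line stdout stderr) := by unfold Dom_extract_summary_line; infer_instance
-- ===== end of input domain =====

-- B replaces A's two sequential scans of the lines by one pass with a remembered fallback (objective: simpler).

-- ===== PORT A =====
-- first loop of A: return line.strip() for the first line containing the marker
def pvFindMarker : List String → Option String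
  | [] => none
  | l :: rest =>
    if PySem.Str.isIn "Embedding summary:" l then some (PySem.Str.strip l)
    else pvFindMarker rest

-- second loop of A: first nonempty stripped line, truncated to 240; "" if none
def pvFirstNonempty : List String → String
  | [] => ""
  | l :: rest =>
    let t := PySem.Str.strip l
    if t ≠ "" then PySem.Str.slice t none (some 240)
    else pvFirstNonempty rest

def extract_summary_line (stdout : String) (stderr : String) : String :=
  let merged := PySem.Str.join "\n" [stdout, stderr]
  let lines := PySem.Str.splitlines merged
  match pvFindMarker lines with
  | some s => s
  | none => pvFirstNonempty lines

-- ===== PORT B =====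
-- single pass: return on the marker line, else remember the first nonempty stripped line
def pvScanB : List String → Option String → String
  | [], fallback => fallback.getD ""
  | l :: rest, fallback =>
    if PySem.Str.isIn "Embedding summary:" l then PySem.Str.strip l
    else
      let fallback' :=
        match fallback with
        | some f => some f
        | none =>
          let t := PySem.Str.strip l
          if t ≠ "" then some (PySem.Str.slice t none (some 240)) else none
      pvScanB rest fallback'

def extract_summary_line_alt (stdout : String) (stderr : String) : String :=
  pvScanB (PySem.Str.splitlines (PySem.Str.join "\n" [stdout, stderr])) none

-- ===== PRECONDITION & SPEC =====
def Spec_extract_summary_line (stdout : String) (stderr : String) (out : String) : Prop := out = extract_summary_line_alt stdout stderr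
instance (stdout : String) (stderr : String) (out : String) : Decidable (Spec_extract_summary_line stdout stderr out) := by unfold Spec_extract_summary_line; infer_instance

-- ===== CLAIM (what is proved, stated in full; the proofs are below) =====
def Claim_equal_extract_summary_line : Prop := ∀ (stdout : String) (stderr : String), Dom_extract_summary_line stdout stderr → Spec_extract_summary_line stdout stderr (extract_summary_line stdout stderr)

-- ===== LEMMAS AND PROOFS =====
theorem pvScanB_eq (lines : List String) : ∀ fb : Option String,
    pvScanB lines fb =
      match pvFindMarker lines with
      | some s => s
      | none => match fb with
        | some f => f
        | none => pvFirstNonempty lines := by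
  induction lines with
  | nil => intro fb; cases fb <;> simp [pvScanB, pvFirstNonempty, pvFindMarker, Option.getD]
  | cons l rest ih =>
    intro fb
    cases fb with
    | some f =>
      simp only [pvScanB, pvFindMarker]
      split_ifs with hm <;> simp [ih]
    | none =>
      simp only [pvScanB, pvFindMarker]
      split_ifs with hm ht
      · simp
      · simp [ih, pvFirstNonempty, ht]
      · simp [ih, pvFirstNonempty, ht]

-- ===== VERDICT (by name: the statement is the Claim_ definition above) =====
theorem extract_summary_line_spec : Claim_equal_extract_summary_line := by
  intro stdout stderr _
  unfold Spec_extract_summary_line extract_summary_line extract_summary_line_alt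
  rw [pvScanB_eq]
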